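-- pv_equiv track=rewrite | github.com/ChrisKK04/palautusrepositorio | viikko7/kivi-paperi-sakset/src/tekoaly_elite.py | _find_sequence_pattern
-- ===== SOURCE A (Python) =====
-- def _find_sequence_pattern(sequence):
--     """
--     Finds repeating patterns in move sequences and predicts the next move.
--     Returns the predicted move based on pattern matching.
--     """
--     if len(sequence) < 2:
--         return None
--
--     # Look for repeating subsequences
--     for pattern_len in range(min(5, len(sequence) // 2), 0, -1):
--         pattern = sequence[-pattern_len:]
--
--         # Count how many times this pattern appears
--         matches = 0
--         for i in range(len(sequence) - pattern_len):
--             if sequence[i:i + pattern_len] == pattern: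
--                 matches += 1
--
--         # If pattern repeats at least twice, predict based on what follows
--         if matches >= 2:
--             # Find what typically follows this pattern
--             for i in range(len(sequence) - pattern_len - 1):
--                 if sequence[i:i + pattern_len] == pattern:
--                     next_move = sequence[i + pattern_len]
--                     return next_move
--
--     return None
-- ===== SOURCE B (Python) =====
-- def _find_sequence_pattern(sequence):
--     """Pattern prediction via a followers index: for each pattern length, build a
--     dict mapping each subsequence to the moves that followed it (in order); the
--     trailing pattern's recorded followers give the prediction directly."""
--     n = len(sequence)
--     if n < 2:
--         return None
--     for pattern_len in range(min(5, n // 2), 0, -1):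
--         followers = {}
--         for i in range(n - pattern_len):
--             key = tuple(sequence[i:i + pattern_len])
--             followers.setdefault(key, []).append(sequence[i + pattern_len])
--         succ = followers.get(tuple(sequence[-pattern_len:]), [])
--         if len(succ) >= 2:
--             return succ[0]
--     return None
-- ===== Notes on version B (the rewrite author's own statement) =====
-- stated objective: alternative
-- what changed: Per pattern length, A scans the sequence twice (one pass counting matches, a second pass re-finding the first match's follower); B instead makes a single pass building a dict index from each subsequence to the ordered list of moves that followed it, then answers directly from the trailing pattern's entry.
import Mathlib
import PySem

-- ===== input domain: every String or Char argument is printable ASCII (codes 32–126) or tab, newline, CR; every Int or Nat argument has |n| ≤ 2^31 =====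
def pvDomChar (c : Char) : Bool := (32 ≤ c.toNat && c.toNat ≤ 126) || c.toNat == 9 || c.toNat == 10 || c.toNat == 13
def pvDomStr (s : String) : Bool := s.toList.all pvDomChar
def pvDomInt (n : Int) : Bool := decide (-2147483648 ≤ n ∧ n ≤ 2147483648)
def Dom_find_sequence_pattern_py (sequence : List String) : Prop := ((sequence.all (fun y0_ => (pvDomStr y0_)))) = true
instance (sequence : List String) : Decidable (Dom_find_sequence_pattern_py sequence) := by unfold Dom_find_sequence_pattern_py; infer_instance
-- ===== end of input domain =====

-- B replaces A's two scans per pattern length (count pass + find-follower pass) by ONE pass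
-- building a followers index (dict pattern → list of following moves); same return value everywhere.

-- ===== PORT A =====
-- inner loop "for i in range(...): if sequence[i:i+pattern_len] == pattern: return sequence[i+pattern_len]"
-- (the index i + pattern_len is always in range when this loop is reached; pyGetD's default is never used)
def pyAFind (sequence : List String) (pl : Int) (pattern : List String) : List Int → Option String
  | [] => none
  | i :: rest =>
    if PySem.List.slice sequence (some i) (some (i + pl)) == pattern then
      some (PySem.List.pyGetD sequence (i + pl) "")
    else pyAFind sequence pl pattern rest

-- outer loop "for pattern_len in range(min(5, len(sequence) // 2), 0, -1): …"
def pyAOuter (sequence : List String) : List Int → Option String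
  | [] => none
  | pl :: rest =>
    let pattern := PySem.List.slice sequence (some (-pl)) none
    let m_cnt := (PySem.List.pyRange 0 ((sequence.length : Int) - pl) 1).foldl
        (fun m i => if PySem.List.slice sequence (some i) (some (i + pl)) == pattern then m + 1 else m) (0 : Int)
    if m_cnt ≥ 2 then
      match pyAFind sequence pl pattern (PySem.List.pyRange 0 ((sequence.length : Int) - pl - 1) 1) with
      | some x => some x
      | none => pyAOuter sequence rest
    else pyAOuter sequence rest

def find_sequence_pattern_py (sequence : List String) : Option String :=
  if (sequence.length : Int) < 2 then none
  else pyAOuter sequence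
    (PySem.List.pyRange (min 5 (PySem.Int.floordiv (sequence.length : Int) 2)) 0 (-1))

-- ===== PORT B =====
-- "for i in range(n - pattern_len): followers.setdefault(key, []).append(sequence[i + pattern_len])"
-- (setdefault+append = insert key with previous list (default []) extended by one element;
--  the index i + pattern_len is always in range, pyGetD's default is never used)
def pyBOuter (sequence : List String) : List Int → Option String
  | [] => none
  | pl :: rest =>
    let followers := (PySem.List.pyRange 0 ((sequence.length : Int) - pl) 1).foldl
        (fun d i =>
          let key := PySem.List.slice sequence (some i) (some (i + pl))
          d.insert key (d.getD key [] ++ [PySem.List.pyGetD sequence (i + pl) ""]))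
        (PySem.Dict.empty : PySem.Dict (List String) (List String))
    let succ := followers.getD (PySem.List.slice sequence (some (-pl)) none) []
    -- "if len(succ) >= 2: return succ[0]"  (succ[0] is in range since len ≥ 2)
    if succ.length ≥ 2 then some (PySem.List.pyGetD succ 0 "") else pyBOuter sequence rest

def find_sequence_pattern_py_alt (sequence : List String) : Option String :=
  if (sequence.length : Int) < 2 then none
  else pyBOuter sequence
    (PySem.List.pyRange (min 5 (PySem.Int.floordiv (sequence.length : Int) 2)) 0 (-1))

-- ===== PRECONDITION & SPEC =====
def Spec_find_sequence_pattern_py (sequence : List String) (out : Option String) : Prop := out = find_sequence_pattern_py_alt sequence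
instance (sequence : List String) (out : Option String) : Decidable (Spec_find_sequence_pattern_py sequence out) := by unfold Spec_find_sequence_pattern_py; infer_instance

-- ===== CLAIM (what is proved, stated in full; the proofs are below) =====
def Claim_equal_find_sequence_pattern_py : Prop := ∀ (sequence : List String), Dom_find_sequence_pattern_py sequence → Spec_find_sequence_pattern_py sequence (find_sequence_pattern_py sequence)

-- ===== LEMMAS AND PROOFS =====

-- B's dict fold, looked up at `key`, is exactly the ordered list of followers of `key`'s occurrences.
theorem followers_getD
    (k : Int → List String) (f : Int → String) (key : List String) :
    ∀ (l : List Int) (d : PySem.Dict (List String) (List String)),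
    ((l.foldl (fun d i => d.insert (k i) (d.getD (k i) [] ++ [f i])) d).getD key [])
      = d.getD key [] ++ (l.filter (fun i => k i == key)).map f := by
  intro l
  induction l with
  | nil => intro d; simp
  | cons i rest ih =>
    intro d
    simp only [List.foldl_cons, List.filter_cons]
    rw [ih]
    by_cases h : k i = key
    · subst h; simp [PySem.Dict.getD_insert_self]
    · rw [PySem.Dict.getD_insert_of_ne _ _ _ (fun he => h he.symm)]
      simp [h]

-- A's find loop returns the follower of the first occurrence in the list.
theorem pyAFind_eq (sequence : List String) (pl : Int) (pattern : List String) :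
    ∀ (l : List Int),
    pyAFind sequence pl pattern l
      = ((l.filter (fun i => PySem.List.slice sequence (some i) (some (i + pl)) == pattern)).head?).map
          (fun i => PySem.List.pyGetD sequence (i + pl) "") := by
  intro l
  induction l with
  | nil => simp [pyAFind]
  | cons i rest ih =>
    simp only [pyAFind, List.filter_cons]
    by_cases h : PySem.List.slice sequence (some i) (some (i + pl)) == pattern
    · simp [h]
    · simp [h, ih]

-- one step of both outer loops agrees, and both recurse in the same cases
theorem step_eq (sequence : List String) (pl : Int) (rest : List Int)
    (hlen : pl ≤ (sequence.length : Int) - 1)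
    (ih : pyAOuter sequence rest = pyBOuter sequence rest) :
    pyAOuter sequence (pl :: rest) = pyBOuter sequence (pl :: rest) := by
  simp only [pyAOuter, pyBOuter]
  set pattern := PySem.List.slice sequence (some (-pl)) none with hpat
  set p : Int → Bool := fun i => PySem.List.slice sequence (some i) (some (i + pl)) == pattern with hp
  set f : Int → String := fun i => PySem.List.pyGetD sequence (i + pl) "" with hf
  have hsplit : PySem.List.pyRange 0 ((sequence.length : Int) - pl) 1
      = PySem.List.pyRange 0 ((sequence.length : Int) - pl - 1) 1 ++ [(sequence.length : Int) - pl - 1] := by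
    have := PySem.List.pyRange_one_succ_right (a := 0) (b := (sequence.length : Int) - pl - 1) (by omega)
    rw [← this]; ring_nf
  -- the count A computes = length of B's followers list
  have hcount : ((PySem.List.pyRange 0 ((sequence.length : Int) - pl) 1).foldl
      (fun m i => if p i then m + 1 else m) (0 : Int))
      = (((PySem.List.pyRange 0 ((sequence.length : Int) - pl) 1).filter p).length : Int) := by
    rw [PySem.List.foldl_if_add_one]
    simp [List.countP_eq_length_filter]
  have hdict := followers_getD (fun i => PySem.List.slice sequence (some i) (some (i + pl))) f pattern
      (PySem.List.pyRange 0 ((sequence.length : Int) - pl) 1) PySem.Dict.empty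
  simp only [PySem.Dict.getD_empty, List.nil_append] at hdict
  rw [hcount, hdict]
  set big := (PySem.List.pyRange 0 ((sequence.length : Int) - pl) 1).filter p with hbig
  set small := (PySem.List.pyRange 0 ((sequence.length : Int) - pl - 1) 1).filter p with hsmall
  have hbs : big = small ++ ([((sequence.length : Int) - pl - 1)].filter p) := by
    rw [hbig, hsmall, hsplit, List.filter_append]
  by_cases h2 : (2 : Int) ≤ (big.length : Int)
  · -- big has ≥ 2 occurrences, so small is nonempty and their heads agree
    have hlb : 2 ≤ big.length := by exact_mod_cast h2
    have hsm : small ≠ [] := by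
      intro hnil
      have h1 := List.length_filter_le p [((sequence.length : Int) - pl - 1)]
      rw [hbs, hnil, List.nil_append] at hlb
      simp at h1
      omega
    obtain ⟨a, t, hsm'⟩ := List.exists_cons_of_ne_nil hsm
    obtain ⟨b', t', hb'⟩ := List.exists_cons_of_ne_nil (l := big)
      (by intro hnil; rw [hnil] at hlb; simp at hlb)
    have hba : b' = a := by
      have h := hbs
      rw [hsm', hb'] at h
      simp at h
      exact h.1
    rw [if_pos (show ((big.length : Int)) ≥ 2 from h2),
        if_pos (show (List.map f big).length ≥ 2 by rw [List.length_map]; exact hlb)]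
    rw [pyAFind_eq, ← hp, ← hsmall, hsm', hb']
    simp [hba, PySem.List.pyGetD_zero_cons]
    rw [hf]
  · -- fewer than 2 occurrences: both sides fall through to the next pattern length
    have hnb : big.length < 2 := by omega
    rw [if_neg (show ¬ ((big.length : Int) ≥ 2) by omega),
        if_neg (show ¬ ((List.map f big).length ≥ 2) by rw [List.length_map]; omega)]
    exact ih

theorem pyOuter_eq (sequence : List String) :
    ∀ (pls : List Int), (∀ pl ∈ pls, 0 < pl ∧ pl ≤ (sequence.length : Int) - 1) →
    pyAOuter sequence pls = pyBOuter sequence pls := by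
  intro pls
  induction pls with
  | nil => intro _; rfl
  | cons pl rest ih =>
    intro h
    have hpl := h pl (by simp)
    exact step_eq sequence pl rest hpl.2 (ih (fun q hq => h q (by simp [hq])))

-- ===== VERDICT (by name: the statement is the Claim_ definition above) =====
theorem find_sequence_pattern_py_spec : Claim_equal_find_sequence_pattern_py := by
  intro sequence _
  unfold Spec_find_sequence_pattern_py find_sequence_pattern_py find_sequence_pattern_py_alt
  by_cases hn : (sequence.length : Int) < 2
  · simp [hn]
  · rw [if_neg hn, if_neg hn]
    apply pyOuter_eq
    intro pl hpl
    rw [PySem.List.mem_pyRange_neg_one] at hpl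
    have h5 : pl ≤ min 5 (PySem.Int.floordiv (sequence.length : Int) 2) := hpl.2
    have hfd : PySem.Int.floordiv (sequence.length : Int) 2 ≤ (sequence.length : Int) - 1 := by
      rw [PySem.Int.floordiv_eq_ediv_of_pos (show (0:Int) < 2 by omega)]
      omega
    constructor
    · exact hpl.1
    · calc pl ≤ min 5 (PySem.Int.floordiv (sequence.length : Int) 2) := h5
        _ ≤ PySem.Int.floordiv (sequence.length : Int) 2 := min_le_right _ _
        _ ≤ (sequence.length : Int) - 1 := hfd
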